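-- pv_equiv track=rewrite | github.com/cfd-dev/PyMeshGen | utils/mesh_utils.py | _compute_triangle_front_depths
-- ===== SOURCE A (Python) =====
-- from collections import defaultdict, deque
--
-- def _compute_triangle_front_depths(edge_map):
--     tri_neighbors = defaultdict(set)
--     tri_depths = {}
--     queue = deque()
--
--     for edge_cells in edge_map.values():
--         if len(edge_cells) == 1:
--             tri_idx = edge_cells[0]
--             if tri_idx not in tri_depths:
--                 tri_depths[tri_idx] = 0
--                 queue.append(tri_idx)
--         elif len(edge_cells) == 2:
--             tri_a, tri_b = edge_cells
--             tri_neighbors[tri_a].add(tri_b)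
--             tri_neighbors[tri_b].add(tri_a)
--
--     while queue:
--         tri_idx = queue.popleft()
--         for neighbor_idx in tri_neighbors[tri_idx]:
--             if neighbor_idx in tri_depths:
--                 continue
--             tri_depths[neighbor_idx] = tri_depths[tri_idx] + 1
--             queue.append(neighbor_idx)
--
--     return tri_depths
-- ===== SOURCE B (Python) =====
-- from collections import defaultdict
--
-- def _compute_triangle_front_depths(edge_map):
--     tri_neighbors = defaultdict(set)
--     for edge_cells in edge_map.values():
--         if len(edge_cells) == 2:
--             tri_a, tri_b = edge_cells
--             tri_neighbors[tri_a].add(tri_b)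
--             tri_neighbors[tri_b].add(tri_a)
--
--     tri_depths = {}
--     for edge_cells in edge_map.values():
--         if len(edge_cells) == 1:
--             tri_depths.setdefault(edge_cells[0], 0)
--
--     # worklist-free wave propagation: the result dict itself is the worklist;
--     # each round rescans it for the triangles sitting at the current depth
--     depth = 0
--     while depth in tri_depths.values():
--         for tri_idx, d in list(tri_depths.items()):
--             if d == depth:
--                 for neighbor_idx in tri_neighbors[tri_idx]:
--                     if neighbor_idx not in tri_depths:
--                         tri_depths[neighbor_idx] = depth + 1
--         depth += 1
--
--     return tri_depths
-- ===== Notes on version B (the rewrite author's own statement) =====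
-- stated objective: alternative
-- what changed: Eliminates A's BFS queue entirely: B builds the adjacency map and seeds boundary triangles with setdefault, then propagates depth waves with no worklist structure at all - each round it rescans the result dict itself for triangles sitting at the current depth and inserts their fresh neighbors at depth+1, looping while any triangle has the current depth.
import Mathlib
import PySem

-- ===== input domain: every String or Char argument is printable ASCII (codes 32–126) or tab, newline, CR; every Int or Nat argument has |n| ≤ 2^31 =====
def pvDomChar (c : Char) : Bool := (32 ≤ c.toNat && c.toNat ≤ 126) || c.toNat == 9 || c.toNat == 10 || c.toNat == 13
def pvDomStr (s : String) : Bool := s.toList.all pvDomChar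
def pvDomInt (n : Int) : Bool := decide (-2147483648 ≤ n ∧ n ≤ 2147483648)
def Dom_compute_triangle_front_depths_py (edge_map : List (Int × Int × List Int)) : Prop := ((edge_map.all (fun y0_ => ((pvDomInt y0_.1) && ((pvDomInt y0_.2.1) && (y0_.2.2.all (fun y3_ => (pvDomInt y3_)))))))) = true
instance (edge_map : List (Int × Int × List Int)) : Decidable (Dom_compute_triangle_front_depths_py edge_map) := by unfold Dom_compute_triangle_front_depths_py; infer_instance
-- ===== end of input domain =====

-- B removes A's BFS queue altogether: after seeding boundary triangles with setdefault, it
-- rescans the depth dict itself each round for entries at the current depth and inserts their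
-- fresh neighbours at depth+1, looping while some entry holds the current depth; same returned
-- dict (alternative algorithm: worklist-free wave propagation, no speed claim).


-- shared input decoding: the Python argument is a dict keyed by edge pairs; its values()
def pvEdgeValues (edge_map : List (Int × Int × List Int)) : List (List Int) :=
  (PySem.Dict.ofList (edge_map.map (fun e => ((e.1, e.2.1), e.2.2)))).values

-- key set / neighbour universe, used by the termination measures of both loops
-- (the lemmas the ports cite in decreasing_by are here too)
def pvKeys (d : PySem.Dict Int Int) : Finset Int := d.keys.toFinset
def pvUniv (nbrs : PySem.Dict Int (PySem.Set Int)) : Finset Int := (nbrs.values.flatten).toFinset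

theorem pv_get?_mem_values {ν : Type} (d : PySem.Dict Int ν) (k : Int) (v : ν)
    (h : d.get? k = some v) : v ∈ d.values := by
  obtain ⟨items⟩ := d
  induction items with
  | nil => simp [PySem.Dict.get?] at h
  | cons p rest ih =>
      obtain ⟨a, b⟩ := p
      rw [PySem.Dict.get?_mk_cons] at h
      by_cases hk : (a == k)
      · simp [hk] at h; subst h; simp [PySem.Dict.values]
      · simp [hk] at h
        have := ih h
        simp [PySem.Dict.values] at this ⊢
        right; exact this

theorem pv_mem_univ (nbrs : PySem.Dict Int (PySem.Set Int)) (t : Int) :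
    ∀ n ∈ nbrs.getD t PySem.Set.empty, n ∈ pvUniv nbrs := by
  intro n hn
  rw [PySem.Dict.getD_eq_get?_getD] at hn
  cases h : nbrs.get? t with
  | none => rw [h] at hn; simp [PySem.Set.empty] at hn
  | some s =>
      rw [h] at hn
      have hs : s ∈ nbrs.values := pv_get?_mem_values nbrs t s h
      simp only [pvUniv, List.mem_toFinset, List.mem_flatten]
      exact ⟨s, hs, hn⟩

-- ===== PORT A =====
-- generic "insert-fresh-and-enqueue" step shape of A's inner BFS loop
def pvStep (v : PySem.Dict Int Int → Int → Int) (st : PySem.Dict Int Int × List Int) (n : Int) :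
    PySem.Dict Int Int × List Int :=
  if st.1.contains n then st else (st.1.insert n (v st.1 n), st.2 ++ [n])

theorem pv_fold_measure (U : Finset Int) (v : PySem.Dict Int Int → Int → Int) (l : List Int)
    (hl : ∀ n ∈ l, n ∈ U) (st : PySem.Dict Int Int × List Int) :
    2 * ((U \ pvKeys (l.foldl (pvStep v) st).1).card) + (l.foldl (pvStep v) st).2.length ≤
      2 * ((U \ pvKeys st.1).card) + st.2.length := by
  induction l generalizing st with
  | nil => simp
  | cons n l ih =>
      simp only [List.foldl_cons]
      by_cases hc : st.1.contains n
      · have hstep : pvStep v st n = st := by simp [pvStep, hc]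
        rw [hstep]
        exact ih (fun m hm => hl m (List.mem_cons_of_mem _ hm)) st
      · have hstep : pvStep v st n = (st.1.insert n (v st.1 n), st.2 ++ [n]) := by
          simp [pvStep, hc]
        rw [hstep]
        have hf0 : st.1.contains n = false := by simpa using hc
        have hkeys : pvKeys (st.1.insert n (v st.1 n)) = insert n (pvKeys st.1) := by
          simp only [pvKeys, PySem.Dict.keys_insert_of_not_contains _ _ hf0,
            List.toFinset_append]
          simp [Finset.union_comm]
        have hnK : n ∉ pvKeys st.1 := by
          simp only [pvKeys, List.mem_toFinset]
          intro hmem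
          exact hc ((PySem.Dict.contains_iff_mem_keys _ _).mpr hmem)
        have hnU : n ∈ U := hl n List.mem_cons_self
        have hmemdiff : n ∈ U \ pvKeys st.1 := Finset.mem_sdiff.mpr ⟨hnU, hnK⟩
        have hcard : (U \ pvKeys (st.1.insert n (v st.1 n))).card =
            (U \ pvKeys st.1).card - 1 := by
          rw [hkeys, Finset.sdiff_insert, Finset.card_erase_of_mem hmemdiff]
        have hpos : 1 ≤ (U \ pvKeys st.1).card := Finset.card_pos.mpr ⟨n, hmemdiff⟩
        have h2 := ih (fun m hm => hl m (List.mem_cons_of_mem _ hm))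
          (st.1.insert n (v st.1 n), st.2 ++ [n])
        simp only [List.length_append, List.length_cons, List.length_nil] at h2 ⊢
        omega

-- inner loop body of A's BFS: 'if neighbor in tri_depths: continue; tri_depths[neighbor] =
-- tri_depths[tri_idx] + 1; queue.append(neighbor)'.  tri_depths[tri_idx] is ported as
-- getD tri_idx 0: the key is always present when A's loop reads it (every queued index was
-- inserted first), so the default is never taken where Python returns.
def pvStepA (tri_idx : Int) (st : PySem.Dict Int Int × List Int) (n : Int) :
    PySem.Dict Int Int × List Int :=
  if st.1.contains n then st else (st.1.insert n (st.1.getD tri_idx 0 + 1), st.2 ++ [n])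

theorem pvStepA_eq (tri_idx : Int) :
    pvStepA tri_idx = pvStep (fun d _ => d.getD tri_idx 0 + 1) := rfl

-- A's single set-up pass over edge_map.values(): state (tri_neighbors, tri_depths, queue)
def pvSetupA (st : PySem.Dict Int (PySem.Set Int) × PySem.Dict Int Int × List Int)
    (edge_cells : List Int) : PySem.Dict Int (PySem.Set Int) × PySem.Dict Int Int × List Int :=
  match edge_cells with
  | [tri_idx] =>
      if st.2.1.contains tri_idx then st
      else (st.1, st.2.1.insert tri_idx 0, st.2.2 ++ [tri_idx])
  | [tri_a, tri_b] =>
      (((st.1.modify tri_a PySem.Set.empty (fun s => PySem.Set.add s tri_b)).modify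
          tri_b PySem.Set.empty (fun s => PySem.Set.add s tri_a)), st.2.1, st.2.2)
  | _ => st

-- A's while loop: pop the queue head, walk its neighbour set
def pvBFSA (nbrs : PySem.Dict Int (PySem.Set Int)) (depths : PySem.Dict Int Int)
    (queue : List Int) : PySem.Dict Int Int :=
  match queue with
  | [] => depths
  | tri_idx :: rest =>
      let st := (nbrs.getD tri_idx PySem.Set.empty).foldl (pvStepA tri_idx) (depths, rest)
      pvBFSA nbrs st.1 st.2
termination_by 2 * ((pvUniv nbrs \ pvKeys depths).card) + queue.length
decreasing_by
  have h := pv_fold_measure (pvUniv nbrs) (fun d _ => d.getD tri_idx 0 + 1)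
    (nbrs.getD tri_idx PySem.Set.empty) (pv_mem_univ nbrs tri_idx) (depths, rest)
  rw [← pvStepA_eq] at h
  simp only [List.length_cons] at *
  omega

def compute_triangle_front_depths_py (edge_map : List (Int × Int × List Int)) : List (Int × Int) :=
  let st := (pvEdgeValues edge_map).foldl pvSetupA
    (PySem.Dict.empty, PySem.Dict.empty, ([] : List Int))
  (pvBFSA st.1 st.2.1 st.2.2).items

-- ===== PORT B =====
-- B's adjacency pass (len == 2 edges only)
def pvNbrStep (st : PySem.Dict Int (PySem.Set Int)) (edge_cells : List Int) :
    PySem.Dict Int (PySem.Set Int) :=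
  match edge_cells with
  | [tri_a, tri_b] =>
      (st.modify tri_a PySem.Set.empty (fun s => PySem.Set.add s tri_b)).modify
        tri_b PySem.Set.empty (fun s => PySem.Set.add s tri_a)
  | _ => st

-- B's seeding pass: tri_depths.setdefault(edge_cells[0], 0) for len == 1 edges
def pvSrcC (d : PySem.Dict Int Int) (edge_cells : List Int) : PySem.Dict Int Int :=
  match edge_cells with
  | [tri_idx] => d.setdefault tri_idx 0
  | _ => d

-- 'if neighbor_idx not in tri_depths: tri_depths[neighbor_idx] = w'
def pvIns (w : Int) (d : PySem.Dict Int Int) (n : Int) : PySem.Dict Int Int :=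
  if d.contains n then d else d.insert n w

-- one matching snapshot entry: walk tri_neighbors[tri_idx], inserting fresh keys at depth+1
def pvInnerC (nbrs : PySem.Dict Int (PySem.Set Int)) (depth : Int) (d : PySem.Dict Int Int)
    (tri_idx : Int) : PySem.Dict Int Int :=
  (nbrs.getD tri_idx PySem.Set.empty).foldl (pvIns (depth + 1)) d

-- body of 'for tri_idx, d in list(tri_depths.items()): if d == depth: …'
def pvRoundStep (nbrs : PySem.Dict Int (PySem.Set Int)) (depth : Int)
    (d : PySem.Dict Int Int) (p : Int × Int) : PySem.Dict Int Int :=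
  if p.2 == depth then pvInnerC nbrs depth d p.1 else d

-- termination bookkeeping for B's while loop: values ≥ depth still to be swept
def pvVals (d : PySem.Dict Int Int) (depth : Int) : Finset Int :=
  (d.values.filter (fun v => depth ≤ v)).toFinset

theorem pv_ins_fold_P (U : Finset Int) (w : Int) (s : List Int) (hs : ∀ n ∈ s, n ∈ U)
    (d : PySem.Dict Int Int) :
    pvKeys d ⊆ pvKeys (s.foldl (pvIns w) d) ∧
    (∀ v ∈ (s.foldl (pvIns w) d).values, v ∈ d.values ∨ v = w) ∧
    ((s.foldl (pvIns w) d) = d ∨ (U \ pvKeys (s.foldl (pvIns w) d)).card < (U \ pvKeys d).card) := by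
  induction s generalizing d with
  | nil => exact ⟨Finset.Subset.refl _, fun v hv => Or.inl hv, Or.inl rfl⟩
  | cons n s ih =>
      simp only [List.foldl_cons]
      by_cases hc : d.contains n
      · have h1 : pvIns w d n = d := by simp [pvIns, hc]
        rw [h1]
        exact ih (fun m hm => hs m (List.mem_cons_of_mem _ hm)) d
      · have h1 : pvIns w d n = d.insert n w := by simp [pvIns, hc]
        rw [h1]
        have hf0 : d.contains n = false := by simpa using hc
        have hkeys : pvKeys (d.insert n w) = insert n (pvKeys d) := by
          simp only [pvKeys, PySem.Dict.keys_insert_of_not_contains _ _ hf0,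
            List.toFinset_append]
          simp [Finset.union_comm]
        have hnK : n ∉ pvKeys d := by
          simp only [pvKeys, List.mem_toFinset]
          intro hmem
          exact hc ((PySem.Dict.contains_iff_mem_keys _ _).mpr hmem)
        have hnU : n ∈ U := hs n List.mem_cons_self
        have hmemdiff : n ∈ U \ pvKeys d := Finset.mem_sdiff.mpr ⟨hnU, hnK⟩
        have hcard : (U \ pvKeys (d.insert n w)).card < (U \ pvKeys d).card := by
          rw [hkeys, Finset.sdiff_insert]
          exact Finset.card_erase_lt_of_mem hmemdiff
        have hvals : (d.insert n w).values = d.values ++ [w] := by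
          simp only [PySem.Dict.values, PySem.Dict.items_insert_of_not_contains _ _ hf0]
          simp
        obtain ⟨ihk, ihv, ihc⟩ := ih (fun m hm => hs m (List.mem_cons_of_mem _ hm)) (d.insert n w)
        refine ⟨?_, ?_, ?_⟩
        · refine Finset.Subset.trans ?_ ihk
          rw [hkeys]; exact Finset.subset_insert _ _
        · intro v hv
          rcases ihv v hv with hv' | hv'
          · rw [hvals] at hv'
            rcases List.mem_append.mp hv' with h | h
            · exact Or.inl h
            · simp only [List.mem_singleton] at h; exact Or.inr h
          · exact Or.inr hv'
        · right
          rcases ihc with he | hlt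
          · rw [he]; exact hcard
          · exact lt_trans hlt hcard

theorem pv_round_fold_P (nbrs : PySem.Dict Int (PySem.Set Int)) (depth : Int)
    (l : List (Int × Int)) (d : PySem.Dict Int Int) :
    pvKeys d ⊆ pvKeys (l.foldl (pvRoundStep nbrs depth) d) ∧
    (∀ v ∈ (l.foldl (pvRoundStep nbrs depth) d).values, v ∈ d.values ∨ v = depth + 1) ∧
    ((l.foldl (pvRoundStep nbrs depth) d) = d ∨
      (pvUniv nbrs \ pvKeys (l.foldl (pvRoundStep nbrs depth) d)).card <
        (pvUniv nbrs \ pvKeys d).card) := by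
  induction l generalizing d with
  | nil => exact ⟨Finset.Subset.refl _, fun v hv => Or.inl hv, Or.inl rfl⟩
  | cons p l ih =>
      simp only [List.foldl_cons]
      by_cases hp : (p.2 == depth) = true
      · have h1 : pvRoundStep nbrs depth d p = pvInnerC nbrs depth d p.1 := by
          simp [pvRoundStep, hp]
        rw [h1]
        have hstep := pv_ins_fold_P (pvUniv nbrs) (depth + 1)
          (nbrs.getD p.1 PySem.Set.empty) (pv_mem_univ nbrs p.1) d
        obtain ⟨hk1, hv1, hc1⟩ := hstep
        rw [show (nbrs.getD p.1 PySem.Set.empty).foldl (pvIns (depth + 1)) d =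
            pvInnerC nbrs depth d p.1 from rfl] at hk1 hv1 hc1
        obtain ⟨hk2, hv2, hc2⟩ := ih (pvInnerC nbrs depth d p.1)
        refine ⟨Finset.Subset.trans hk1 hk2, ?_, ?_⟩
        · intro v hv
          rcases hv2 v hv with hv' | hv'
          · exact hv1 v hv'
          · exact Or.inr hv'
        · rcases hc2 with he | hlt
          · rw [he]; exact hc1
          · rcases hc1 with he1 | hlt1
            · right
              have hk : (pvUniv nbrs \ pvKeys (pvInnerC nbrs depth d p.1)).card =
                  (pvUniv nbrs \ pvKeys d).card := by rw [he1]
              omega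
            · right; exact lt_trans hlt hlt1
      · have h1 : pvRoundStep nbrs depth d p = d := by simp [pvRoundStep, hp]
        rw [h1]
        exact ih d

theorem pv_round_measure (nbrs : PySem.Dict Int (PySem.Set Int)) (depth : Int)
    (d : PySem.Dict Int Int) (hc : d.values.contains depth = true) :
    2 * ((pvUniv nbrs \ pvKeys (d.items.foldl (pvRoundStep nbrs depth) d)).card) +
        (pvVals (d.items.foldl (pvRoundStep nbrs depth) d) (depth + 1)).card <
      2 * ((pvUniv nbrs \ pvKeys d).card) + (pvVals d depth).card := by
  have hmem : depth ∈ d.values := by simpa using hc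
  have hdin : depth ∈ pvVals d depth := by
    simp only [pvVals, List.mem_toFinset, List.mem_filter]
    exact ⟨hmem, by simp⟩
  obtain ⟨hk, hv, hcase⟩ := pv_round_fold_P nbrs depth d.items d
  rcases hcase with he | hlt
  · rw [he]
    have hsub : pvVals d (depth + 1) ⊆ pvVals d depth := by
      intro v hvv
      simp only [pvVals, List.mem_toFinset, List.mem_filter, decide_eq_true_eq] at hvv ⊢
      exact ⟨hvv.1, by omega⟩
    have hnot : depth ∉ pvVals d (depth + 1) := by
      simp only [pvVals, List.mem_toFinset, List.mem_filter, decide_eq_true_eq]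
      intro h; omega
    have : (pvVals d (depth + 1)).card < (pvVals d depth).card :=
      Finset.card_lt_card (Finset.ssubset_iff_of_subset hsub |>.mpr ⟨depth, hdin, hnot⟩)
    omega
  · have hsub : pvVals (d.items.foldl (pvRoundStep nbrs depth) d) (depth + 1) ⊆
        insert (depth + 1) ((pvVals d depth).erase depth) := by
      intro v hvv
      simp only [pvVals, List.mem_toFinset, List.mem_filter, decide_eq_true_eq] at hvv
      rcases hv v hvv.1 with h | h
      · apply Finset.mem_insert_of_mem
        apply Finset.mem_erase.mpr
        refine ⟨by omega, ?_⟩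
        simp only [pvVals, List.mem_toFinset, List.mem_filter, decide_eq_true_eq]
        exact ⟨h, by omega⟩
      · simp [h]
    have h1 : (pvVals (d.items.foldl (pvRoundStep nbrs depth) d) (depth + 1)).card ≤
        (pvVals d depth).card := by
      calc (pvVals (d.items.foldl (pvRoundStep nbrs depth) d) (depth + 1)).card
          ≤ (insert (depth + 1) ((pvVals d depth).erase depth)).card := Finset.card_le_card hsub
        _ ≤ ((pvVals d depth).erase depth).card + 1 := Finset.card_insert_le _ _
        _ = (pvVals d depth).card - 1 + 1 := by rw [Finset.card_erase_of_mem hdin]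
        _ ≤ (pvVals d depth).card := by
            have := Finset.card_pos.mpr ⟨depth, hdin⟩
            omega
    omega

-- B's while loop: 'while depth in tri_depths.values(): sweep the items snapshot; depth += 1'
def pvBFSC (nbrs : PySem.Dict Int (PySem.Set Int)) (depths : PySem.Dict Int Int)
    (depth : Int) : PySem.Dict Int Int :=
  if hc : depths.values.contains depth = true then
    pvBFSC nbrs (depths.items.foldl (pvRoundStep nbrs depth) depths) (depth + 1)
  else depths
termination_by 2 * ((pvUniv nbrs \ pvKeys depths).card) + (pvVals depths depth).card
decreasing_by
  simp only [List.foldl_attach]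
  exact pv_round_measure nbrs depth depths hc

def compute_triangle_front_depths_py_alt (edge_map : List (Int × Int × List Int)) :
    List (Int × Int) :=
  let cells := pvEdgeValues edge_map
  let nbrs := cells.foldl pvNbrStep PySem.Dict.empty
  let depths := cells.foldl pvSrcC PySem.Dict.empty
  (pvBFSC nbrs depths 0).items

-- ===== PRECONDITION & SPEC =====
def Spec_compute_triangle_front_depths_py (edge_map : List (Int × Int × List Int)) (out : List (Int × Int)) : Prop := out = compute_triangle_front_depths_py_alt edge_map
instance (edge_map : List (Int × Int × List Int)) (out : List (Int × Int)) : Decidable (Spec_compute_triangle_front_depths_py edge_map out) := by unfold Spec_compute_triangle_front_depths_py; infer_instance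

-- ===== CLAIM (what is proved, stated in full; the proofs are below) =====
def Claim_equal_compute_triangle_front_depths_py : Prop := ∀ (edge_map : List (Int × Int × List Int)), Dom_compute_triangle_front_depths_py edge_map → Spec_compute_triangle_front_depths_py edge_map (compute_triangle_front_depths_py edge_map)

-- ===== LEMMAS AND PROOFS =====

-- proof-side intermediate: the level-synchronous BFS, bridging A's queue BFS and B's rescans
def pvStepB (depth' : Int) (st : PySem.Dict Int Int × List Int) (n : Int) :
    PySem.Dict Int Int × List Int :=
  if st.1.contains n then st else (st.1.insert n depth', st.2 ++ [n])

theorem pvStepB_eq (depth' : Int) : pvStepB depth' = pvStep (fun _ _ => depth') := rfl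

def pvExpandB (nbrs : PySem.Dict Int (PySem.Set Int)) (depth' : Int)
    (st : PySem.Dict Int Int × List Int) (tri_idx : Int) : PySem.Dict Int Int × List Int :=
  (nbrs.getD tri_idx PySem.Set.empty).foldl (pvStepB depth') st

theorem pv_expand_measure (nbrs : PySem.Dict Int (PySem.Set Int)) (depth' : Int)
    (f : List Int) (st : PySem.Dict Int Int × List Int) :
    2 * ((pvUniv nbrs \ pvKeys (f.foldl (pvExpandB nbrs depth') st).1).card) +
        (f.foldl (pvExpandB nbrs depth') st).2.length ≤
      2 * ((pvUniv nbrs \ pvKeys st.1).card) + st.2.length := by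
  induction f generalizing st with
  | nil => simp
  | cons t f ih =>
      simp only [List.foldl_cons]
      refine le_trans (ih _) ?_
      show 2 * ((pvUniv nbrs \ pvKeys (pvExpandB nbrs depth' st t).1).card) +
          (pvExpandB nbrs depth' st t).2.length ≤ _
      unfold pvExpandB
      rw [pvStepB_eq]
      exact pv_fold_measure (pvUniv nbrs) _ _ (pv_mem_univ nbrs t) st

def pvBFSB (nbrs : PySem.Dict Int (PySem.Set Int)) (depths : PySem.Dict Int Int)
    (frontier : List Int) (depth : Int) : PySem.Dict Int Int :=
  match frontier with
  | [] => depths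
  | t :: rest =>
      let depth' := depth + 1
      let st := (t :: rest).foldl (pvExpandB nbrs depth') (depths, ([] : List Int))
      pvBFSB nbrs st.1 st.2 depth'
termination_by 2 * ((pvUniv nbrs \ pvKeys depths).card) + frontier.length
decreasing_by
  have h := pv_expand_measure nbrs (depth + 1) (t :: rest) (depths, ([] : List Int))
  simp only [List.length_cons, List.length_nil] at *
  omega

-- A's set-up pass splits into an adjacency part and a (dict, queue) source part
def pvSrcStep (st : PySem.Dict Int Int × List Int) (edge_cells : List Int) :
    PySem.Dict Int Int × List Int :=
  match edge_cells with
  | [tri_idx] =>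
      if st.1.contains tri_idx then st else (st.1.insert tri_idx 0, st.2 ++ [tri_idx])
  | _ => st

-- fold of a pvStep: first component ignores the queue, queue only grows by appending
theorem pv_fold_split (v : PySem.Dict Int Int → Int → Int) (l : List Int)
    (d : PySem.Dict Int Int) (q : List Int) :
    l.foldl (pvStep v) (d, q) =
      ((l.foldl (pvStep v) (d, [])).1, q ++ (l.foldl (pvStep v) (d, [])).2) := by
  induction l generalizing d q with
  | nil => simp
  | cons n l ih =>
      simp only [List.foldl_cons]
      by_cases hc : d.contains n
      · have h1 : pvStep v (d, q) n = (d, q) := by simp [pvStep, hc]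
        have h2 : pvStep v (d, ([] : List Int)) n = (d, []) := by simp [pvStep, hc]
        rw [h1, h2]
        exact ih d q
      · have h1 : pvStep v (d, q) n = (d.insert n (v d n), q ++ [n]) := by simp [pvStep, hc]
        have h2 : pvStep v (d, ([] : List Int)) n = (d.insert n (v d n), [n]) := by
          simp [pvStep, hc]
        rw [h1, h2, ih _ (q ++ [n]), ih _ [n]]
        simp

-- fold of a pvStep preserves existing bindings
theorem pv_fold_get? (v : PySem.Dict Int Int → Int → Int) (l : List Int)
    (d : PySem.Dict Int Int) (q : List Int) (k : Int) (w : Int) (h : d.get? k = some w) :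
    (l.foldl (pvStep v) (d, q)).1.get? k = some w := by
  induction l generalizing d q with
  | nil => simpa
  | cons n l ih =>
      simp only [List.foldl_cons]
      by_cases hc : d.contains n
      · have h1 : pvStep v (d, q) n = (d, q) := by simp [pvStep, hc]
        rw [h1]; exact ih _ _ h
      · have h1 : pvStep v (d, q) n = (d.insert n (v d n), q ++ [n]) := by simp [pvStep, hc]
        have hck : d.contains k = true := by
          rw [PySem.Dict.contains_eq_isSome_get?, h]; rfl
        have hkn : k ≠ n := by intro he; rw [he] at hck; simp [hck] at hc
        rw [h1]
        exact ih _ _ (by rw [PySem.Dict.get?_insert_of_ne _ _ hkn]; exact h)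

-- while t is bound to depth, A's inner step writes exactly depth+1, i.e. equals the level step
theorem pv_fold_A_eq_B (t : Int) (dep : Int) (l : List Int)
    (d : PySem.Dict Int Int) (q : List Int) (ht : d.get? t = some dep) :
    l.foldl (pvStepA t) (d, q) = l.foldl (pvStepB (dep + 1)) (d, q) := by
  induction l generalizing d q with
  | nil => rfl
  | cons n l ih =>
      simp only [List.foldl_cons]
      by_cases hc : d.contains n
      · have h1 : pvStepA t (d, q) n = (d, q) := by simp [pvStepA, hc]
        have h2 : pvStepB (dep + 1) (d, q) n = (d, q) := by simp [pvStepB, hc]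
        rw [h1, h2]; exact ih _ _ ht
      · have hdg : d.getD t 0 = dep := by
          rw [PySem.Dict.getD_eq_get?_getD, ht]; rfl
        have h1 : pvStepA t (d, q) n = (d.insert n (dep + 1), q ++ [n]) := by
          simp [pvStepA, hc, hdg]
        have h2 : pvStepB (dep + 1) (d, q) n = (d.insert n (dep + 1), q ++ [n]) := by
          simp [pvStepB, hc]
        have hct : d.contains t = true := by
          rw [PySem.Dict.contains_eq_isSome_get?, ht]; rfl
        have htn : t ≠ n := by intro he; rw [he] at hct; simp [hct] at hc
        rw [h1, h2]
        exact ih _ _ (by rw [PySem.Dict.get?_insert_of_ne _ _ htn]; exact ht)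

-- everything in the produced queue is bound to w (constant-depth step)
theorem pv_fold_B_inv (w : Int) (l : List Int) (d : PySem.Dict Int Int) (q : List Int)
    (hq : ∀ s ∈ q, d.get? s = some w) :
    ∀ s ∈ (l.foldl (pvStepB w) (d, q)).2, (l.foldl (pvStepB w) (d, q)).1.get? s = some w := by
  induction l generalizing d q with
  | nil => simpa using hq
  | cons n l ih =>
      simp only [List.foldl_cons]
      by_cases hc : d.contains n
      · have h1 : pvStepB w (d, q) n = (d, q) := by simp [pvStepB, hc]
        rw [h1]; exact ih _ _ hq
      · have h1 : pvStepB w (d, q) n = (d.insert n w, q ++ [n]) := by simp [pvStepB, hc]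
        rw [h1]
        refine ih _ _ ?_
        intro s hs
        rcases List.mem_append.mp hs with hs | hs
        · have hcs : d.contains s = true := by
            rw [PySem.Dict.contains_eq_isSome_get?, hq s hs]; rfl
          have hsn : s ≠ n := by intro he; rw [he] at hcs; simp [hcs] at hc
          rw [PySem.Dict.get?_insert_of_ne _ _ hsn]; exact hq s hs
        · simp only [List.mem_singleton] at hs
          subst hs
          exact PySem.Dict.get?_insert_self _ _ _

-- the same, lifted over a whole frontier
theorem pv_expand_fold_inv (nbrs : PySem.Dict Int (PySem.Set Int)) (w : Int) (f : List Int)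
    (d : PySem.Dict Int Int) (q : List Int) (hq : ∀ s ∈ q, d.get? s = some w) :
    ∀ s ∈ (f.foldl (pvExpandB nbrs w) (d, q)).2,
      (f.foldl (pvExpandB nbrs w) (d, q)).1.get? s = some w := by
  induction f generalizing d q with
  | nil => simpa using hq
  | cons t f ih =>
      simp only [List.foldl_cons]
      have hone := pv_fold_B_inv w (nbrs.getD t PySem.Set.empty) d q hq
      have hpair : pvExpandB nbrs w (d, q) t =
          (((nbrs.getD t PySem.Set.empty).foldl (pvStepB w) (d, q)).1,
           ((nbrs.getD t PySem.Set.empty).foldl (pvStepB w) (d, q)).2) := rfl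
      rw [hpair]
      exact ih _ _ hone

-- A's set-up pass is the pair of the adjacency pass and the (dict, queue) source pass
theorem pv_setup_split (l : List (List Int)) (n : PySem.Dict Int (PySem.Set Int))
    (d : PySem.Dict Int Int) (q : List Int) :
    l.foldl pvSetupA (n, d, q) = (l.foldl pvNbrStep n, l.foldl pvSrcStep (d, q)) := by
  induction l generalizing n d q with
  | nil => rfl
  | cons ec l ih =>
      simp only [List.foldl_cons]
      have hstep : pvSetupA (n, d, q) ec = (pvNbrStep n ec, pvSrcStep (d, q) ec) := by
        rcases ec with _ | ⟨a, _ | ⟨b, _ | ⟨c, tl⟩⟩⟩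
        · rfl
        · by_cases hc : d.contains a <;> simp [pvSetupA, pvNbrStep, pvSrcStep, hc]
        · rfl
        · rfl
      rw [hstep]
      exact ih _ _ _

-- the initial frontier is bound to 0
theorem pv_src_inv (l : List (List Int)) (d : PySem.Dict Int Int) (q : List Int)
    (hq : ∀ s ∈ q, d.get? s = some 0) :
    ∀ s ∈ (l.foldl pvSrcStep (d, q)).2, (l.foldl pvSrcStep (d, q)).1.get? s = some 0 := by
  induction l generalizing d q with
  | nil => simpa using hq
  | cons ec l ih =>
      simp only [List.foldl_cons]
      refine ih _ _ ?_
      rcases ec with _ | ⟨a, _ | ⟨b, tl⟩⟩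
      · exact hq
      · show ∀ s ∈ (pvSrcStep (d, q) [a]).2, (pvSrcStep (d, q) [a]).1.get? s = some 0
        by_cases hc : d.contains a
        · simpa [pvSrcStep, hc] using hq
        · simp only [pvSrcStep, hc, Bool.false_eq_true, if_false]
          intro s hs
          rcases List.mem_append.mp hs with hs | hs
          · have hcs : d.contains s = true := by
              rw [PySem.Dict.contains_eq_isSome_get?, hq s hs]; rfl
            have hsa : s ≠ a := by intro he; rw [he] at hcs; simp [hcs] at hc
            rw [PySem.Dict.get?_insert_of_ne _ _ hsa]; exact hq s hs
          · simp only [List.mem_singleton] at hs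
            subst hs
            exact PySem.Dict.get?_insert_self _ _ _
      · exact hq

-- one expansion splits off its queue contribution
theorem pv_expand_split (nbrs : PySem.Dict Int (PySem.Set Int)) (w : Int)
    (d : PySem.Dict Int Int) (q : List Int) (t : Int) :
    pvExpandB nbrs w (d, q) t =
      ((pvExpandB nbrs w (d, []) t).1, q ++ (pvExpandB nbrs w (d, []) t).2) := by
  unfold pvExpandB
  rw [pvStepB_eq]
  exact pv_fold_split _ _ _ _

-- one expansion preserves existing bindings
theorem pv_expand_get? (nbrs : PySem.Dict Int (PySem.Set Int)) (w : Int)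
    (d : PySem.Dict Int Int) (q : List Int) (t : Int) (k : Int) (w' : Int)
    (h : d.get? k = some w') : (pvExpandB nbrs w (d, q) t).1.get? k = some w' := by
  unfold pvExpandB
  rw [pvStepB_eq]
  exact pv_fold_get? _ _ _ _ _ _ h

-- LEVEL LEMMA: processing one whole level f of the queue (all bound to depth) is one expansion
theorem pv_level (nbrs : PySem.Dict Int (PySem.Set Int)) (f g : List Int)
    (depths : PySem.Dict Int Int) (depth : Int) :
    (∀ t ∈ f, depths.get? t = some depth) →
    pvBFSA nbrs depths (f ++ g) =
      pvBFSA nbrs (f.foldl (pvExpandB nbrs (depth + 1)) (depths, g)).1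
        (f.foldl (pvExpandB nbrs (depth + 1)) (depths, g)).2 := by
  induction f generalizing depths g with
  | nil => intro _; simp
  | cons t f ih =>
      intro hf
      have ht := hf t List.mem_cons_self
      have hf' : ∀ s ∈ f,
          (pvExpandB nbrs (depth + 1) (depths, []) t).1.get? s = some depth :=
        fun s hs => pv_expand_get? _ _ _ _ _ _ _ (hf s (List.mem_cons_of_mem _ hs))
      have hAB : (nbrs.getD t PySem.Set.empty).foldl (pvStepA t) (depths, f ++ g) =
          pvExpandB nbrs (depth + 1) (depths, f ++ g) t :=
        pv_fold_A_eq_B t depth _ _ _ ht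
      rw [List.cons_append, pvBFSA]
      rw [hAB, pv_expand_split nbrs (depth + 1) depths (f ++ g) t, List.foldl_cons,
        pv_expand_split nbrs (depth + 1) depths g t]
      dsimp only
      rw [List.append_assoc, ih _ _ hf']

-- queue BFS = level-synchronous BFS
theorem pv_main (nbrs : PySem.Dict Int (PySem.Set Int)) (depths : PySem.Dict Int Int)
    (frontier : List Int) (depth : Int) :
    (∀ t ∈ frontier, depths.get? t = some depth) →
    pvBFSA nbrs depths frontier = pvBFSB nbrs depths frontier depth := by
  induction depths, frontier, depth using pvBFSB.induct with
  | nbrs => exact nbrs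
  | case1 depths depth =>
      intro _
      rw [pvBFSA, pvBFSB]
  | case2 depths depth t rest depth_ st_ ih =>
      intro hf
      rw [pvBFSB]
      have h1 : pvBFSA nbrs depths (t :: rest) = pvBFSA nbrs depths ((t :: rest) ++ []) := by
        rw [List.append_nil]
      rw [h1, pv_level nbrs (t :: rest) [] depths depth hf]
      exact ih (pv_expand_fold_inv nbrs (depth + 1) (t :: rest) depths [] (by intro s hs; simp at hs))

-- the dict component of a level step equals B's conditional-insert fold
theorem pv_stepB_fst (w : Int) (s : List Int) (d : PySem.Dict Int Int) (q : List Int) :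
    (s.foldl (pvStepB w) (d, q)).1 = s.foldl (pvIns w) d := by
  induction s generalizing d q with
  | nil => rfl
  | cons n s ih =>
      simp only [List.foldl_cons]
      by_cases hc : d.contains n
      · have h1 : pvStepB w (d, q) n = (d, q) := by simp [pvStepB, hc]
        have h2 : pvIns w d n = d := by simp [pvIns, hc]
        rw [h1, h2]; exact ih _ _
      · have h1 : pvStepB w (d, q) n = (d.insert n w, q ++ [n]) := by simp [pvStepB, hc]
        have h2 : pvIns w d n = d.insert n w := by simp [pvIns, hc]
        rw [h1, h2]; exact ih _ _

-- the dict component of a whole-frontier expansion equals B's inner sweep over the frontier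
theorem pv_expand_fst (nbrs : PySem.Dict Int (PySem.Set Int)) (depth : Int) (f : List Int)
    (d : PySem.Dict Int Int) (q : List Int) :
    (f.foldl (pvExpandB nbrs (depth + 1)) (d, q)).1 =
      f.foldl (fun d t => pvInnerC nbrs depth d t) d := by
  induction f generalizing d q with
  | nil => rfl
  | cons t f ih =>
      simp only [List.foldl_cons]
      have h1 : pvExpandB nbrs (depth + 1) (d, q) t =
          (((nbrs.getD t PySem.Set.empty).foldl (pvStepB (depth + 1)) (d, q)).1,
           ((nbrs.getD t PySem.Set.empty).foldl (pvStepB (depth + 1)) (d, q)).2) := rfl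
      rw [h1, pv_stepB_fst]
      exact ih _ _

-- a level step appends exactly its queue entries, bound to w, and keeps keys nodup
theorem pv_stepB_items (w : Int) (s : List Int) (d : PySem.Dict Int Int) (q : List Int)
    (hnd : d.keys.Nodup) :
    ∃ l, (s.foldl (pvStepB w) (d, q)).1.items = d.items ++ l.map (fun k => (k, w)) ∧
      (s.foldl (pvStepB w) (d, q)).2 = q ++ l ∧ (d.keys ++ l).Nodup := by
  induction s generalizing d q with
  | nil => exact ⟨[], by simp, by simp, by simpa using hnd⟩
  | cons n s ih =>
      simp only [List.foldl_cons]
      by_cases hc : d.contains n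
      · have h1 : pvStepB w (d, q) n = (d, q) := by simp [pvStepB, hc]
        rw [h1]; exact ih d q hnd
      · have h1 : pvStepB w (d, q) n = (d.insert n w, q ++ [n]) := by simp [pvStepB, hc]
        rw [h1]
        have hf0 : d.contains n = false := by simpa using hc
        have hitems : (d.insert n w).items = d.items ++ [(n, w)] :=
          PySem.Dict.items_insert_of_not_contains _ _ hf0
        have hkeys : (d.insert n w).keys = d.keys ++ [n] :=
          PySem.Dict.keys_insert_of_not_contains _ _ hf0
        have hnmem : n ∉ d.keys := fun hmem =>
          hc ((PySem.Dict.contains_iff_mem_keys _ _).mpr hmem)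
        have hnd' : (d.insert n w).keys.Nodup := by
          rw [hkeys, List.nodup_append]
          refine ⟨hnd, List.nodup_singleton _, ?_⟩
          intro a ha b hb he
          exact hnmem ((he.trans (List.mem_singleton.mp hb)) ▸ ha)
        obtain ⟨l, hl1, hl2, hl3⟩ := ih (d.insert n w) (q ++ [n]) hnd'
        refine ⟨n :: l, ?_, ?_, ?_⟩
        · rw [hl1, hitems]; simp
        · rw [hl2]; simp
        · rw [hkeys] at hl3
          simpa using hl3

-- lifted over a whole frontier
theorem pv_expand_items (nbrs : PySem.Dict Int (PySem.Set Int)) (w : Int) (f : List Int)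
    (d : PySem.Dict Int Int) (q : List Int) (hnd : d.keys.Nodup) :
    ∃ l, (f.foldl (pvExpandB nbrs w) (d, q)).1.items = d.items ++ l.map (fun k => (k, w)) ∧
      (f.foldl (pvExpandB nbrs w) (d, q)).2 = q ++ l ∧ (d.keys ++ l).Nodup := by
  induction f generalizing d q with
  | nil => exact ⟨[], by simp, by simp, by simpa using hnd⟩
  | cons t f ih =>
      simp only [List.foldl_cons]
      have h1 : pvExpandB nbrs w (d, q) t =
          (((nbrs.getD t PySem.Set.empty).foldl (pvStepB w) (d, q)).1,
           ((nbrs.getD t PySem.Set.empty).foldl (pvStepB w) (d, q)).2) := rfl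
      obtain ⟨l1, ha1, ha2, ha3⟩ := pv_stepB_items w (nbrs.getD t PySem.Set.empty) d q hnd
      have hkeys1 : ((nbrs.getD t PySem.Set.empty).foldl (pvStepB w) (d, q)).1.keys =
          d.keys ++ l1 := by
        simp only [PySem.Dict.keys, ha1, List.map_append]
        congr 1
        simp [Function.comp_def]
      have hnd1 : ((nbrs.getD t PySem.Set.empty).foldl (pvStepB w) (d, q)).1.keys.Nodup := by
        rw [hkeys1]; exact ha3
      obtain ⟨l2, hb1, hb2, hb3⟩ := ih _ _ hnd1
      rw [h1] at *
      refine ⟨l1 ++ l2, ?_, ?_, ?_⟩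
      · rw [hb1, ha1]; simp
      · rw [hb2, ha2]; simp
      · rw [hkeys1] at hb3
        simpa using hb3

-- entries with a value other than depth are skipped by the round sweep
theorem pv_round_skip (nbrs : PySem.Dict Int (PySem.Set Int)) (depth : Int)
    (pre : List (Int × Int)) (h : ∀ p ∈ pre, p.2 ≠ depth) (d : PySem.Dict Int Int) :
    pre.foldl (pvRoundStep nbrs depth) d = d := by
  induction pre generalizing d with
  | nil => rfl
  | cons p pre ih =>
      simp only [List.foldl_cons]
      have h1 : pvRoundStep nbrs depth d p = d := by
        simp [pvRoundStep, h p List.mem_cons_self]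
      rw [h1]
      exact ih (fun p hp => h p (List.mem_cons_of_mem _ hp)) d

-- the source pass: its dict component equals B's setdefault pass
theorem pv_src_fst (cells : List (List Int)) (d : PySem.Dict Int Int) (q : List Int) :
    (cells.foldl pvSrcStep (d, q)).1 = cells.foldl pvSrcC d := by
  induction cells generalizing d q with
  | nil => rfl
  | cons ec cells ih =>
      simp only [List.foldl_cons]
      rcases ec with _ | ⟨a, _ | ⟨b, tl⟩⟩
      · exact ih _ _
      · by_cases hc : d.contains a
        · have h1 : pvSrcStep (d, q) [a] = (d, q) := by simp [pvSrcStep, hc]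
          have h2 : pvSrcC d [a] = d := by
            simp [pvSrcC, PySem.Dict.setdefault_of_contains _ (0 : Int) hc]
          rw [h1, h2]; exact ih _ _
        · have hf0 : d.contains a = false := by simpa using hc
          have h1 : pvSrcStep (d, q) [a] = (d.insert a 0, q ++ [a]) := by
            simp [pvSrcStep, hc]
          have h2 : pvSrcC d [a] = d.insert a 0 := by
            simp [pvSrcC, PySem.Dict.setdefault_of_not_contains _ (0 : Int) hf0]
          rw [h1, h2]; exact ih _ _
      · exact ih _ _

-- the source pass appends exactly its queue, bound to 0, with nodup keys
theorem pv_src_items (cells : List (List Int)) (d : PySem.Dict Int Int) (q : List Int)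
    (hnd : d.keys.Nodup) :
    ∃ l, (cells.foldl pvSrcStep (d, q)).1.items = d.items ++ l.map (fun k => (k, (0 : Int))) ∧
      (cells.foldl pvSrcStep (d, q)).2 = q ++ l ∧ (d.keys ++ l).Nodup := by
  induction cells generalizing d q with
  | nil => exact ⟨[], by simp, by simp, by simpa using hnd⟩
  | cons ec cells ih =>
      simp only [List.foldl_cons]
      rcases ec with _ | ⟨a, _ | ⟨b, tl⟩⟩
      · exact ih d q hnd
      · by_cases hc : d.contains a
        · have h1 : pvSrcStep (d, q) [a] = (d, q) := by simp [pvSrcStep, hc]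
          rw [h1]; exact ih d q hnd
        · have hf0 : d.contains a = false := by simpa using hc
          have h1 : pvSrcStep (d, q) [a] = (d.insert a 0, q ++ [a]) := by
            simp [pvSrcStep, hc]
          rw [h1]
          have hitems : (d.insert a (0 : Int)).items = d.items ++ [(a, (0 : Int))] :=
            PySem.Dict.items_insert_of_not_contains _ _ hf0
          have hkeys : (d.insert a (0 : Int)).keys = d.keys ++ [a] :=
            PySem.Dict.keys_insert_of_not_contains _ _ hf0
          have hamem : a ∉ d.keys := fun hmem =>
            hc ((PySem.Dict.contains_iff_mem_keys _ _).mpr hmem)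
          have hnd' : (d.insert a (0 : Int)).keys.Nodup := by
            rw [hkeys, List.nodup_append]
            refine ⟨hnd, List.nodup_singleton _, ?_⟩
            intro x hx b hb he
            exact hamem ((he.trans (List.mem_singleton.mp hb)) ▸ hx)
          obtain ⟨l, hl1, hl2, hl3⟩ := ih (d.insert a 0) (q ++ [a]) hnd'
          refine ⟨a :: l, ?_, ?_, ?_⟩
          · rw [hl1, hitems]; simp
          · rw [hl2]; simp
          · rw [hkeys] at hl3; simpa using hl3
      · exact ih d q hnd

-- BRIDGE: under the suffix invariant, level-synchronous BFS = B's dict-rescan wave loop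
theorem pv_bridge (nbrs : PySem.Dict Int (PySem.Set Int)) (d : PySem.Dict Int Int)
    (f : List Int) (depth : Int) :
    ∀ pre, d.items = pre ++ f.map (fun k => (k, depth)) → (∀ p ∈ pre, p.2 < depth) →
      d.keys.Nodup → pvBFSB nbrs d f depth = pvBFSC nbrs d depth := by
  induction d, f, depth using pvBFSB.induct with
  | nbrs => exact nbrs
  | case1 d depth =>
      intro pre hitems hpre _
      have hcond : d.values.contains depth = false := by
        simp only [List.map_nil, List.append_nil] at hitems
        rw [Bool.eq_false_iff]
        intro hc
        have : depth ∈ d.values := by simpa using hc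
        simp only [PySem.Dict.values, hitems, List.mem_map] at this
        obtain ⟨p, hp, hpv⟩ := this
        exact absurd hpv (by have := hpre p hp; omega)
      rw [pvBFSB, pvBFSC, dif_neg (by rw [hcond]; simp)]
  | case2 d depth t rest depth_ st_ ih =>
      intro pre hitems hpre hnd
      have htmem : (t, depth) ∈ d.items := by
        rw [hitems]; simp
      have hcond : d.values.contains depth = true := by
        have : depth ∈ d.values := by
          simp only [PySem.Dict.values, List.mem_map]
          exact ⟨(t, depth), htmem, rfl⟩
        simpa using this
      -- the round sweep over the snapshot = the whole-frontier expansion's dict component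
      have hround : d.items.foldl (pvRoundStep nbrs depth) d =
          ((t :: rest).foldl (pvExpandB nbrs (depth + 1)) (d, ([] : List Int))).1 := by
        rw [pv_expand_fst, hitems, List.foldl_append,
          pv_round_skip nbrs depth pre (fun p hp => by have := hpre p hp; omega) d,
          List.foldl_map]
        apply PySem.List.foldl_congr_mem
        intro b a _
        simp [pvRoundStep]
      obtain ⟨l, hl1, hl2, hl3⟩ :=
        pv_expand_items nbrs (depth + 1) (t :: rest) d ([] : List Int) hnd
      have hkeysst : ((t :: rest).foldl (pvExpandB nbrs (depth + 1)) (d, ([] : List Int))).1.keys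
          = d.keys ++ l := by
        simp only [PySem.Dict.keys, hl1, List.map_append]
        congr 1
        simp [Function.comp_def]
      have hbound : ∀ p ∈ d.items, p.2 < depth + 1 := by
        intro p hp
        rw [hitems] at hp
        rcases List.mem_append.mp hp with h | h
        · have := hpre p h; omega
        · obtain ⟨k, _, hk⟩ := List.mem_map.mp h
          rw [← hk]; omega
      rw [pvBFSB, ih d.items (by rw [hl1, hl2]; rfl) hbound (by rw [hkeysst]; exact hl3)]
      conv_rhs => rw [pvBFSC]
      rw [dif_pos hcond, hround]

-- ===== VERDICT (by name: the statement is the Claim_ definition above) =====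
theorem compute_triangle_front_depths_py_spec : Claim_equal_compute_triangle_front_depths_py := by
  intro edge_map _
  unfold Spec_compute_triangle_front_depths_py
  simp only [compute_triangle_front_depths_py, compute_triangle_front_depths_py_alt,
    pv_setup_split]
  have h0 : ∀ s ∈ (((pvEdgeValues edge_map).foldl pvSrcStep (PySem.Dict.empty, ([] : List Int)))).2,
      (((pvEdgeValues edge_map).foldl pvSrcStep (PySem.Dict.empty, ([] : List Int)))).1.get? s = some 0 :=
    pv_src_inv _ _ _ (by intro s hs; simp at hs)
  rw [pv_main _ _ _ 0 h0]
  obtain ⟨l, hl1, hl2, hl3⟩ := pv_src_items (pvEdgeValues edge_map)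
    PySem.Dict.empty ([] : List Int) (by simp)
  have hkeys : ((pvEdgeValues edge_map).foldl pvSrcStep (PySem.Dict.empty, ([] : List Int))).1.keys
      = l := by
    simp only [PySem.Dict.keys, hl1]
    simp [PySem.Dict.empty, Function.comp_def]
  rw [pv_bridge _ _ _ 0 []
    (by rw [hl1, hl2]; simp [PySem.Dict.empty])
    (by intro p hp; simp at hp)
    (by rw [hkeys]; simpa using hl3)]
  rw [pv_src_fst]
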